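-- pv_equiv track=rewrite | github.com/eldr4d/project773 | src/post_time.py | hour_sit_tweets
-- ===== SOURCE A (Python) =====
-- def hour_sit_tweets(sec,twe):   #groups tweets and times tweeted, for those output within a 60 min span, input ymdhm (min) time
--     sits = [[sec[0]]]
--     pits = [[twe[0]]]
--     for x,y in (zip(sec[1:],twe[1:])):
--         if abs(x - sits[-1][-1]) <= 60:
--             sits[-1].append(x)
--             pits[-1].append(y)
--
--         else:
--             sits.append([x])
--             pits.append([y])
--
--     return sits,pits
-- ===== SOURCE B (Python) =====
-- def hour_sit_tweets(sec, twe):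
--     # Two-phase: one pass computes the run lengths of <=60-gap spans of the
--     # (zip-truncated) time list, then both lists are partitioned by those lengths.
--     n = min(len(sec), len(twe))
--     xs = sec[:n]
--     ys = twe[:n]
--     lens = []
--     run = 0
--     prev = 0
--     for x in xs:
--         if run and abs(x - prev) <= 60:
--             run += 1
--         else:
--             if run:
--                 lens.append(run)
--             run = 1
--         prev = x
--     if run:
--         lens.append(run)
--     sits = []
--     pits = []
--     for k in lens:
--         sits.append(xs[:k])
--         xs = xs[k:]
--         pits.append(ys[:k])
--         ys = ys[k:]
--     return sits, pits
-- ===== Notes on version B (the rewrite author's own statement) =====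
-- stated objective: alternative
-- what changed: A grows nested group lists by mutating/appending to the last group inside one loop; B makes one pass computing the run lengths of <=60-gap spans and then partitions the two zip-truncated lists by those lengths.
import Mathlib
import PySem

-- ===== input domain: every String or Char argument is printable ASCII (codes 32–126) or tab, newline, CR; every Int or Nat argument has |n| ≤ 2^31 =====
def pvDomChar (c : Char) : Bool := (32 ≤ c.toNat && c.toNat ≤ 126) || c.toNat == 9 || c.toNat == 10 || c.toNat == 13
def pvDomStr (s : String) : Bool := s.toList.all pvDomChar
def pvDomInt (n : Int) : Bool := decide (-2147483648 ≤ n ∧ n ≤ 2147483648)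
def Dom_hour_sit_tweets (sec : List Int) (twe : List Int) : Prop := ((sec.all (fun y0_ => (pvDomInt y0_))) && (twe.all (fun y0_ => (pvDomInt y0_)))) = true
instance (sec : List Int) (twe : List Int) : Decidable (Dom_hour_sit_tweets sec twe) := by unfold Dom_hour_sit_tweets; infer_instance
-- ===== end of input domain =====

-- B replaces A's append-to-last-group mutation loop by two phases — one pass computing
-- the run lengths of ≤60-gap spans, then partitioning both (zip-truncated) lists by
-- those lengths (objective: alternative decomposition, same cost).

-- ===== PORT A =====

-- sits[-1][-1] (both lists are always nonempty when A reads them; defaults unreachable)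
def pvLastLast (xss : List (List Int)) : Int := (xss.getLastD []).getLastD 0

-- sits[-1].append(x) : append x to the last inner list (Python mutates in place)
def pvPushLast : List (List Int) → Int → List (List Int)
  | [], _ => []
  | [g], x => [g ++ [x]]
  | g :: gs, x => g :: pvPushLast gs x

-- one iteration of A's for-loop body over state (sits, pits)
def pvStepA (st : List (List Int) × List (List Int)) (p : Int × Int) :
    List (List Int) × List (List Int) :=
  if (p.1 - pvLastLast st.1).natAbs ≤ 60 then (pvPushLast st.1 p.1, pvPushLast st.2 p.2)
  else (st.1 ++ [[p.1]], st.2 ++ [[p.2]])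

-- sec[0]/twe[0] raise IndexError on an empty list: those inputs are outside Pre_ below,
-- so the headD defaults are never reached on admitted inputs.
def hour_sit_tweets (sec : List Int) (twe : List Int) : List (List Int) × List (List Int) :=
  ((PySem.List.slice sec (some 1) none).zip (PySem.List.slice twe (some 1) none)).foldl
    pvStepA ([[sec.headD 0]], [[twe.headD 0]])

-- ===== PORT B =====

-- B's first loop body: state (lens, run, prev)
def pvStepLen : List Nat × Nat × Int → Int → List Nat × Nat × Int
  | (lens, run, prev), x =>
    if run ≠ 0 ∧ (x - prev).natAbs ≤ 60 then (lens, run + 1, x)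
    else ((if run ≠ 0 then lens ++ [run] else lens), 1, x)

-- B's epilogue: 'if run: lens.append(run)'
def pvFinish (st : List Nat × Nat × Int) : List Nat :=
  if st.2.1 ≠ 0 then st.1 ++ [st.2.1] else st.1

-- B's second loop body: state (sits, pits, xs, ys), consuming k elements per group
def pvStepCut : List (List Int) × List (List Int) × List Int × List Int → Nat →
    List (List Int) × List (List Int) × List Int × List Int
  | (sits, pits, xs, ys), k => (sits ++ [xs.take k], pits ++ [ys.take k], xs.drop k, ys.drop k)

def hour_sit_tweets_alt (sec : List Int) (twe : List Int) : List (List Int) × List (List Int) :=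
  let n := min sec.length twe.length
  let xs := PySem.List.slice sec none (some (n : Int))
  let ys := PySem.List.slice twe none (some (n : Int))
  let lens := pvFinish (xs.foldl pvStepLen ([], 0, 0))
  let fin := lens.foldl pvStepCut ([], [], xs, ys)
  (fin.1, fin.2.1)

-- ===== PRECONDITION & SPEC =====
-- Pre_ excludes exactly the inputs where A raises IndexError: an empty sec or twe.
def Pre_hour_sit_tweets (sec : List Int) (twe : List Int) : Prop := sec ≠ [] ∧ twe ≠ []
instance (sec : List Int) (twe : List Int) : Decidable (Pre_hour_sit_tweets sec twe) := by
  unfold Pre_hour_sit_tweets; infer_instance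

def pvWitness_hour_sit_tweets : List Int × List Int := ([0, 30, 200], [1, 2, 3])

def Spec_hour_sit_tweets (sec : List Int) (twe : List Int) (out : List (List Int) × List (List Int)) : Prop := out = hour_sit_tweets_alt sec twe
instance (sec : List Int) (twe : List Int) (out : List (List Int) × List (List Int)) : Decidable (Spec_hour_sit_tweets sec twe out) := by unfold Spec_hour_sit_tweets; infer_instance

-- ===== CLAIM (what is proved, stated in full; the proofs are below) =====
def Claim_equal_hour_sit_tweets : Prop := ∀ (sec : List Int) (twe : List Int), Dom_hour_sit_tweets sec twe → Pre_hour_sit_tweets sec twe → Spec_hour_sit_tweets sec twe (hour_sit_tweets sec twe)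

-- ===== LEMMAS AND PROOFS =====

-- canonical front-recursive grouping both ports are reduced to
def pvChunk : Int → Int → List (Int × Int) → List (List Int) × List (List Int)
  | x, y, [] => ([[x]], [[y]])
  | x, y, (a, b) :: rest =>
    let s := pvChunk a b rest
    if (a - x).natAbs ≤ 60 then ((x :: s.1.headD []) :: s.1.tail, (y :: s.2.headD []) :: s.2.tail)
    else ([x] :: s.1, [y] :: s.2)

-- run lengths of the groups of x :: t
def pvRuns : Int → List Int → List Nat
  | _, [] => [1]
  | x, a :: t =>
    if (a - x).natAbs ≤ 60 then
      match pvRuns a t with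
      | [] => [1]
      | h :: tl => (h + 1) :: tl
    else 1 :: pvRuns a t

def pvSplit : List Nat → List Int → List (List Int)
  | [], _ => []
  | k :: ks, xs => xs.take k :: pvSplit ks (xs.drop k)

theorem pvRuns_ne_nil (x : Int) (t : List Int) : pvRuns x t ≠ [] := by
  cases t with
  | nil => simp [pvRuns]
  | cons a t =>
    simp only [pvRuns]
    split
    · cases pvRuns a t <;> simp
    · simp

theorem pvPushLast_append (pre : List (List Int)) (g : List Int) (x : Int) :
    pvPushLast (pre ++ [g]) x = pre ++ [g ++ [x]] := by
  induction pre with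
  | nil => simp [pvPushLast]
  | cons h t ih =>
    cases t with
    | nil => simp [pvPushLast]
    | cons h2 t2 => simpa [pvPushLast] using ih

theorem pvLastLast_append (pre : List (List Int)) (g : List Int) :
    pvLastLast (pre ++ [g]) = g.getLastD 0 := by
  simp [pvLastLast]

-- the loop only touches the last group: a group prefix passes through unchanged
theorem foldl_stepA_prefix (l : List (Int × Int)) :
    ∀ (pre pre' : List (List Int)) (g h : List Int),
    (l.foldl pvStepA (pre ++ [g], pre' ++ [h])) =
      (pre ++ (l.foldl pvStepA ([g], [h])).1, pre' ++ (l.foldl pvStepA ([g], [h])).2) := by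
  induction l with
  | nil => intro pre pre' g h; simp
  | cons p t ih =>
    intro pre pre' g h
    simp only [List.foldl_cons, pvStepA, pvLastLast_append]
    have hg : pvLastLast [g] = g.getLastD 0 := by simp [pvLastLast]
    rw [hg]
    split
    · rw [pvPushLast_append, pvPushLast_append]
      have h1 : pvPushLast [g] p.1 = [g ++ [p.1]] := by simp [pvPushLast]
      have h2 : pvPushLast [h] p.2 = [h ++ [p.2]] := by simp [pvPushLast]
      rw [h1, h2, ih]
    · rw [ih (pre ++ [g]) (pre' ++ [h]) [p.1] [p.2], ih [g] [h] [p.1] [p.2]]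
      simp

-- only the last element of the open group matters
theorem foldl_stepA_open (l : List (Int × Int)) :
    ∀ (u v : List Int) (a b : Int),
    (l.foldl pvStepA ([u ++ [a]], [v ++ [b]])) =
      ((u ++ (l.foldl pvStepA ([[a]], [[b]])).1.headD []) :: (l.foldl pvStepA ([[a]], [[b]])).1.tail,
       (v ++ (l.foldl pvStepA ([[a]], [[b]])).2.headD []) :: (l.foldl pvStepA ([[a]], [[b]])).2.tail) := by
  induction l with
  | nil => intro u v a b; simp
  | cons p t ih =>
    intro u v a b
    simp only [List.foldl_cons, pvStepA]
    have h1 : pvLastLast [u ++ [a]] = a := by simp [pvLastLast]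
    have h2 : pvLastLast [[a]] = a := by simp [pvLastLast]
    rw [h1, h2]
    split
    · have e1 : pvPushLast [u ++ [a]] p.1 = [(u ++ [a]) ++ [p.1]] := by simp [pvPushLast]
      have e2 : pvPushLast [v ++ [b]] p.2 = [(v ++ [b]) ++ [p.2]] := by simp [pvPushLast]
      have e3 : pvPushLast [[a]] p.1 = [[a] ++ [p.1]] := by simp [pvPushLast]
      have e4 : pvPushLast [[b]] p.2 = [[b] ++ [p.2]] := by simp [pvPushLast]
      rw [e1, e2, e3, e4, ih (u ++ [a]) (v ++ [b]) p.1 p.2, ih [a] [b] p.1 p.2]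
      simp
    · rw [show [u ++ [a]] ++ [[p.1]] = ([u ++ [a]] : List (List Int)) ++ [[p.1]] from rfl]
      rw [foldl_stepA_prefix t [u ++ [a]] [v ++ [b]] [p.1] [p.2]]
      rw [show ([[a]] : List (List Int)) ++ [[p.1]] = [[a]] ++ [[p.1]] from rfl]
      rw [foldl_stepA_prefix t [[a]] [[b]] [p.1] [p.2]]
      simp

-- A's fold is the canonical grouping
theorem foldl_stepA_chunk (l : List (Int × Int)) :
    ∀ (x y : Int), l.foldl pvStepA ([[x]], [[y]]) = pvChunk x y l := by
  induction l with
  | nil => intro x y; simp [pvChunk]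
  | cons p t ih =>
    intro x y
    obtain ⟨a, b⟩ := p
    simp only [List.foldl_cons, pvStepA, pvChunk]
    have h2 : pvLastLast [[x]] = x := by simp [pvLastLast]
    rw [h2]
    split
    · have e3 : pvPushLast [[x]] a = [[x] ++ [a]] := by simp [pvPushLast]
      have e4 : pvPushLast [[y]] b = [[y] ++ [b]] := by simp [pvPushLast]
      rw [e3, e4, foldl_stepA_open t [x] [y] a b, ih a b]
      simp
    · rw [foldl_stepA_prefix t [[x]] [[y]] [a] [b], ih a b]
      simp

-- the canonical grouping is split-by-run-lengths, on both components
theorem pvChunk_split (l : List (Int × Int)) :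
    ∀ (x y : Int),
    pvChunk x y l = (pvSplit (pvRuns x (l.map Prod.fst)) (x :: l.map Prod.fst),
                     pvSplit (pvRuns x (l.map Prod.fst)) (y :: l.map Prod.snd)) := by
  induction l with
  | nil => intro x y; simp [pvChunk, pvRuns, pvSplit]
  | cons p t ih =>
    intro x y
    obtain ⟨a, b⟩ := p
    simp only [List.map_cons, pvChunk, pvRuns, ih a b]
    split
    · rcases hr : pvRuns a (t.map Prod.fst) with _ | ⟨h, tl⟩
      · exact absurd hr (pvRuns_ne_nil _ _)
      · simp [pvSplit]
    · simp [pvSplit]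

-- B's first loop computes the run lengths
theorem foldl_stepLen_runs (t : List Int) :
    ∀ (lens : List Nat) (run : Nat) (prev : Int), run ≠ 0 →
    pvFinish (t.foldl pvStepLen (lens, run, prev)) =
      lens ++ (match pvRuns prev t with
               | [] => []
               | h :: tl => (run - 1 + h) :: tl) := by
  induction t with
  | nil =>
    intro lens run prev hr
    have h1 : run - 1 + 1 = run := by omega
    simp only [List.foldl_nil, pvRuns, h1, pvFinish]
    rw [if_pos hr]
  | cons x t ih =>
    intro lens run prev hr
    simp only [List.foldl_cons, pvStepLen, pvRuns]
    by_cases hc : (x - prev).natAbs ≤ 60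
    · have hinit : (if run ≠ 0 ∧ (x - prev).natAbs ≤ 60 then (lens, run + 1, x)
          else ((if run ≠ 0 then lens ++ [run] else lens), 1, x)) = (lens, run + 1, x) :=
        if_pos ⟨hr, hc⟩
      rw [hinit, if_pos hc]
      rw [ih lens (run + 1) x (Nat.succ_ne_zero run)]
      rcases hx : pvRuns x t with _ | ⟨h, tl⟩
      · exact absurd hx (pvRuns_ne_nil _ _)
      · simp only [List.append_cancel_left_eq, List.cons.injEq]
        constructor
        · omega
        · trivial
    · have hinit : (if run ≠ 0 ∧ (x - prev).natAbs ≤ 60 then (lens, run + 1, x)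
          else ((if run ≠ 0 then lens ++ [run] else lens), 1, x)) = (lens ++ [run], 1, x) := by
        rw [if_neg (by tauto), if_pos hr]
      rw [hinit, if_neg hc]
      rw [ih (lens ++ [run]) 1 x one_ne_zero]
      rcases hx : pvRuns x t with _ | ⟨h, tl⟩
      · exact absurd hx (pvRuns_ne_nil _ _)
      · have h3 : run - 1 + 1 = run := by omega
        simp [h3]

-- B's second loop splits both lists by the run lengths
theorem foldl_stepCut_split (lens : List Nat) :
    ∀ (sits pits : List (List Int)) (xs ys : List Int),
    lens.foldl pvStepCut (sits, pits, xs, ys) =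
      (sits ++ pvSplit lens xs, pits ++ pvSplit lens ys,
       xs.drop (lens.sum), ys.drop (lens.sum)) := by
  induction lens with
  | nil => intro sits pits xs ys; simp [pvSplit]
  | cons k ks ih =>
    intro sits pits xs ys
    simp only [List.foldl_cons, pvStepCut, ih, pvSplit]
    simp [List.drop_drop]

-- map fst / map snd of a zip are the truncated lists
theorem map_fst_zip_take (a b : List Int) :
    (a.zip b).map Prod.fst = a.take (min a.length b.length) := by
  induction a generalizing b with
  | nil => simp
  | cons x t ih =>
    cases b with
    | nil => simp
    | cons y u => simp [ih u, Nat.succ_min_succ]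

theorem map_snd_zip_take (a b : List Int) :
    (a.zip b).map Prod.snd = b.take (min a.length b.length) := by
  induction a generalizing b with
  | nil => simp
  | cons x t ih =>
    cases b with
    | nil => simp
    | cons y u => simp [ih u, Nat.succ_min_succ]

-- ===== VERDICT (by name: the statement is the Claim_ definition above) =====
theorem hour_sit_tweets_spec : Claim_equal_hour_sit_tweets := by
  intro sec twe _ hpre
  obtain ⟨hs, ht⟩ := hpre
  unfold Spec_hour_sit_tweets
  obtain ⟨s0, st, rfl⟩ := List.exists_cons_of_ne_nil hs
  obtain ⟨t0, tt, rfl⟩ := List.exists_cons_of_ne_nil ht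
  -- A side
  rw [hour_sit_tweets]
  rw [PySem.List.slice_from_one, PySem.List.slice_from_one]
  simp only [List.tail_cons, List.headD_cons]
  rw [foldl_stepA_chunk, pvChunk_split]
  -- B side
  rw [hour_sit_tweets_alt]
  simp only [PySem.List.slice_to_natCast]
  set n := min (s0 :: st).length (t0 :: tt).length with hn
  have hn1 : 1 ≤ n := by simp [hn]
  obtain ⟨m, hm⟩ : ∃ m, n = m + 1 := ⟨n - 1, by omega⟩
  have hxs : (s0 :: st).take n = s0 :: st.take (n - 1) := by
    rw [hm]; simp
  have hys : (t0 :: tt).take n = t0 :: tt.take (n - 1) := by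
    rw [hm]; simp
  have hmin : min st.length tt.length = n - 1 := by
    simp only [hn, List.length_cons]; omega
  have hfst : (st.zip tt).map Prod.fst = st.take (n - 1) := by
    rw [map_fst_zip_take, hmin]
  have hsnd : (st.zip tt).map Prod.snd = tt.take (n - 1) := by
    rw [map_snd_zip_take, hmin]
  rw [hxs, hys]
  have hstep0 : pvStepLen ([], 0, 0) s0 = ([], 1, s0) := by simp [pvStepLen]
  rw [List.foldl_cons, hstep0]
  have hL := foldl_stepLen_runs (st.take (n - 1)) [] 1 s0 one_ne_zero
  rcases hr : pvRuns s0 (st.take (n - 1)) with _ | ⟨h, tl⟩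
  · exact absurd hr (pvRuns_ne_nil _ _)
  · rw [hr] at hL
    simp only [Nat.sub_self, Nat.zero_add] at hL
    rw [hL]
    rw [foldl_stepCut_split]
    simp [hfst, hsnd, hr]
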